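-- pv_equiv track=rewrite | github.com/cirosantilli/project-euler-solvers | solvers/33.py | reduced_product_denominator
-- ===== SOURCE A (Python) =====
-- from math import gcd
-- from typing import List, Tuple
--
-- def reduced_product_denominator(fracs: List[Tuple[int, int]]) -> int:
--     num_prod = 1
--     den_prod = 1
--     for n, d in fracs:
--         num_prod *= n
--         den_prod *= d
--     g = gcd(num_prod, den_prod)
--     num_prod //= g
--     den_prod //= g
--     return den_prod
-- ===== SOURCE B (Python) =====
-- from math import gcd
--
-- def reduced_product_denominator(fracs):
--     # Eager reduction: keep a reduced running fraction; no final gcd pass.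
--     num = 1
--     den = 1
--     for n, d in fracs:
--         num *= n
--         den *= d
--         g = gcd(num, den)
--         num //= g
--         den //= g
--     return den
-- ===== Notes on version B (the rewrite author's own statement) =====
-- stated objective: alternative
-- what changed: B maintains a running reduced fraction, dividing numerator and denominator by their gcd after every multiplication and returning the final denominator directly, instead of multiplying all fractions into two raw products and reducing once at the end.
import Mathlib
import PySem

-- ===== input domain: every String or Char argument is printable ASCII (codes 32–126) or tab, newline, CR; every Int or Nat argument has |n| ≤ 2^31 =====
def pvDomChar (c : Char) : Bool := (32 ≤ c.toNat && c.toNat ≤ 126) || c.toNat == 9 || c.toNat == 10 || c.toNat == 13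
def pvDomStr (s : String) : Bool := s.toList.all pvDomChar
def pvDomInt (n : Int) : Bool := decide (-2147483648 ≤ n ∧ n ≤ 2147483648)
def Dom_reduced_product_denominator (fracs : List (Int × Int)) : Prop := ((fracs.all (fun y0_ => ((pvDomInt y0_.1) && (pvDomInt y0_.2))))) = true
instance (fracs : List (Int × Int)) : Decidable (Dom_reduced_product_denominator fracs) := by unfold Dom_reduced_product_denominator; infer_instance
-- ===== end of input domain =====

-- B keeps a running reduced fraction (dividing by the gcd every iteration)
-- instead of reducing the raw products once at the end.


-- ===== PORT A =====
def reduced_product_denominator (fracs : List (Int × Int)) : Int :=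
  let s := fracs.foldl (fun (st : Int × Int) (p : Int × Int) => (st.1 * p.1, st.2 * p.2)) (1, 1)
  let g : Int := (Int.gcd s.1 s.2 : Int)
  let _num_prod := PySem.Int.floordiv s.1 g
  let den_prod := PySem.Int.floordiv s.2 g
  den_prod

-- ===== PORT B =====
def reduced_product_denominator_alt (fracs : List (Int × Int)) : Int :=
  (fracs.foldl (fun (st : Int × Int) (p : Int × Int) =>
      let num := st.1 * p.1
      let den := st.2 * p.2
      let g : Int := (Int.gcd num den : Int)
      (PySem.Int.floordiv num g, PySem.Int.floordiv den g)) (1, 1)).2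

-- ===== PRECONDITION & SPEC =====
-- A raises ZeroDivisionError (gcd = 0) exactly when some numerator and some
-- denominator are 0; B raises there too, so those inputs are excluded.
def Pre_reduced_product_denominator (fracs : List (Int × Int)) : Prop :=
  ¬ ((∃ p ∈ fracs, p.1 = 0) ∧ (∃ p ∈ fracs, p.2 = 0))
instance (fracs : List (Int × Int)) : Decidable (Pre_reduced_product_denominator fracs) := by
  unfold Pre_reduced_product_denominator; infer_instance
def pvWitness_reduced_product_denominator : (List (Int × Int)) := [(49, 98), (30, 96), (35, 50)]
def Spec_reduced_product_denominator (fracs : List (Int × Int)) (out : Int) : Prop := out = reduced_product_denominator_alt fracs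
instance (fracs : List (Int × Int)) (out : Int) : Decidable (Spec_reduced_product_denominator fracs out) := by unfold Spec_reduced_product_denominator; infer_instance

-- ===== CLAIM (what is proved, stated in full; the proofs are below) =====
def Claim_equal_reduced_product_denominator : Prop := ∀ (fracs : List (Int × Int)), Dom_reduced_product_denominator fracs → Pre_reduced_product_denominator fracs → Spec_reduced_product_denominator fracs (reduced_product_denominator fracs)

-- ===== LEMMAS AND PROOFS =====

-- reduce a fraction by its (nonnegative) gcd, with Lean's ediv
def pvReduce (a b : Int) : Int × Int :=
  ((a / (Int.gcd a b : Int)), (b / (Int.gcd a b : Int)))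

theorem pv_fd_gcd (a b : Int) :
    PySem.Int.floordiv a (Int.gcd a b : Int) = a / (Int.gcd a b : Int) ∧
    PySem.Int.floordiv b (Int.gcd a b : Int) = b / (Int.gcd a b : Int) := by
  rcases Nat.eq_zero_or_pos (Int.gcd a b) with h | h
  · rcases Int.gcd_eq_zero_iff.mp h with ⟨ha, hb⟩
    subst ha; subst hb; exact ⟨by decide, by decide⟩
  · have hp : (0 : Int) < (Int.gcd a b : Int) := by exact_mod_cast h
    exact ⟨PySem.Int.floordiv_eq_ediv_of_pos hp, PySem.Int.floordiv_eq_ediv_of_pos hp⟩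

-- reducing after one more multiplication is the same on the reduced state
theorem pv_step_red (a b n d : Int) :
    pvReduce ((pvReduce a b).1 * n) ((pvReduce a b).2 * d) = pvReduce (a * n) (b * d) := by
  rcases Nat.eq_zero_or_pos (Int.gcd a b) with h | h
  · rcases Int.gcd_eq_zero_iff.mp h with ⟨ha, hb⟩
    subst ha; subst hb; simp [pvReduce]
  · have hp : (0 : Int) < (Int.gcd a b : Int) := by exact_mod_cast h
    set g : Int := (Int.gcd a b : Int) with hg
    have habs : ((g.natAbs : Nat) : Int) = g := Int.natAbs_of_nonneg (le_of_lt hp)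
    obtain ⟨a', ha'⟩ : g ∣ a := hg ▸ Int.gcd_dvd_left a b
    obtain ⟨b', hb'⟩ : g ∣ b := hg ▸ Int.gcd_dvd_right a b
    have hga : a / g = a' := by rw [ha']; exact Int.mul_ediv_cancel_left _ (ne_of_gt hp)
    have hgb : b / g = b' := by rw [hb']; exact Int.mul_ediv_cancel_left _ (ne_of_gt hp)
    have hgcd : (Int.gcd (a * n) (b * d) : Int) = g * (Int.gcd (a' * n) (b' * d) : Int) := by
      rw [ha', hb', mul_assoc, mul_assoc, Int.gcd_mul_left, Nat.cast_mul, habs]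
    have e1 : a * n = g * (a' * n) := by rw [ha']; ring
    have e2 : b * d = g * (b' * d) := by rw [hb']; ring
    unfold pvReduce
    rw [hga, hgb, hgcd, e1, e2, Int.mul_ediv_mul_of_pos _ _ hp, Int.mul_ediv_mul_of_pos _ _ hp]

-- B's fold step, written with ediv (equal to the port's floordiv step)
def pvStepB (st : Int × Int) (p : Int × Int) : Int × Int :=
  pvReduce (st.1 * p.1) (st.2 * p.2)

theorem pv_stepB_eq (st p : Int × Int) :
    (let num := st.1 * p.1
     let den := st.2 * p.2
     let g : Int := (Int.gcd num den : Int)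
     ((PySem.Int.floordiv num g, PySem.Int.floordiv den g) : Int × Int)) = pvStepB st p := by
  have h := pv_fd_gcd (st.1 * p.1) (st.2 * p.2)
  simp only [pvStepB, pvReduce, h.1, h.2]

-- main invariant: eager reduction of the raw product fold
theorem pv_main (l : List (Int × Int)) : ∀ a b : Int,
    l.foldl pvStepB (pvReduce a b) =
      pvReduce (l.foldl (fun (st : Int × Int) (p : Int × Int) => (st.1 * p.1, st.2 * p.2)) (a, b)).1
               (l.foldl (fun (st : Int × Int) (p : Int × Int) => (st.1 * p.1, st.2 * p.2)) (a, b)).2 := by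
  induction l with
  | nil => intro a b; simp
  | cons hd tl ih =>
    intro a b
    simp only [List.foldl_cons]
    have hstep : pvStepB (pvReduce a b) hd = pvReduce (a * hd.1) (b * hd.2) := by
      unfold pvStepB; exact pv_step_red a b hd.1 hd.2
    rw [hstep, ih (a * hd.1) (b * hd.2)]

theorem pv_alt_eq (fracs : List (Int × Int)) :
    reduced_product_denominator_alt fracs = (fracs.foldl pvStepB (1, 1)).2 := by
  unfold reduced_product_denominator_alt
  have hfun : (fun (st : Int × Int) (p : Int × Int) =>
      let num := st.1 * p.1
      let den := st.2 * p.2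
      let g : Int := (Int.gcd num den : Int)
      ((PySem.Int.floordiv num g, PySem.Int.floordiv den g) : Int × Int)) = pvStepB := by
    funext st p; exact pv_stepB_eq st p
  rw [hfun]

-- ===== VERDICT (by name: the statement is the Claim_ definition above) =====
theorem reduced_product_denominator_spec : Claim_equal_reduced_product_denominator := by
  intro fracs _ _
  unfold Spec_reduced_product_denominator
  rw [pv_alt_eq]
  unfold reduced_product_denominator
  have h1 : pvReduce (1 : Int) (1 : Int) = ((1 : Int), (1 : Int)) := by decide
  have := pv_main fracs 1 1
  rw [h1] at this
  rw [this]
  simp only [pvReduce]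
  exact (pv_fd_gcd _ _).2
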